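-- pv_equiv track=rewrite | github.com/Cyber-cicco/spring-CRUD-facilitator | crud/dto_parser.py | find_ts_type
-- ===== SOURCE A (Python) =====
-- type_mapping = {
--     'String': 'string',
--     'int': 'number',
--     'Integer': 'number',
--     'long': 'number',
--     'Long': 'number',
--     'float': 'number',
--     'double': 'number',
--     'Double': 'number',
--     'Float': 'number',
--     'double': 'number',
--     'boolean': 'boolean',
--     'Boolean': 'boolean',
--     'LocalDateTime' : 'Date',
--     'LocalDate' : 'Date',
--     'LocalTime' : 'Date',
--     'MultipartFile' : 'File',
--     'HttpStatus':'HttpStatusCode',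
--     # add more type mappings as needed
-- }
--
-- def find_ts_type(java_type:str, imports:list=[]):
--     java_type = java_type.strip()
--     if java_type in type_mapping.keys():
--         return type_mapping.get(java_type, 'any')
--     else:
--         if java_type.endswith("Dto"):
--             new_type = java_type[:-3]
--             imports.append(f"import {{{new_type}}} from \"./{new_type.lower()}\";\n")
--             return new_type
--         elif '<' in java_type:
--             next_type = java_type.split('<')[0].strip()
--             if 'Map' == next_type:
--                 return 'Object'
--             elif 'List' == next_type :
--                 inner_type = java_type[ java_type.index("<")+1 : -1 ].strip()
--                 return find_ts_type(inner_type, imports) + "[]"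
--             elif 'ResponseEntity' == next_type:
--                 inner_type = java_type[ java_type.index("<")+1 : -1 ].strip()
--                 return find_ts_type(inner_type, imports)
--             else:
--                 return 'any'
--         else:
--             return "any"
-- ===== SOURCE B (Python) =====
-- type_mapping = {
--     'String': 'string',
--     'int': 'number',
--     'Integer': 'number',
--     'long': 'number',
--     'Long': 'number',
--     'float': 'number',
--     'double': 'number',
--     'Double': 'number',
--     'Float': 'number',
--     'double': 'number',
--     'boolean': 'boolean',
--     'Boolean': 'boolean',
--     'LocalDateTime' : 'Date',
--     'LocalDate' : 'Date',
--     'LocalTime' : 'Date',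
--     'MultipartFile' : 'File',
--     'HttpStatus':'HttpStatusCode',
-- }
--
-- def find_ts_type(java_type: str, imports: list = []):
--     # Iterative: peel wrapper generics with an explicit suffix accumulator
--     # instead of recursing.
--     suffix = ""
--     t = java_type
--     while True:
--         t = t.strip()
--         mapped = type_mapping.get(t)
--         if mapped is not None:
--             return mapped + suffix
--         if t.endswith("Dto"):
--             base = t[:-3]
--             imports.append(f"import {{{base}}} from \"./{base.lower()}\";\n")
--             return base + suffix
--         lt = t.find('<')
--         if lt == -1:
--             return "any" + suffix
--         head = t[:lt].strip()
--         if head == 'Map':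
--             return 'Object' + suffix
--         if head == 'List' or head == 'ResponseEntity':
--             if head == 'List':
--                 suffix = "[]" + suffix
--             t = t[lt + 1:-1]
--             continue
--         return "any" + suffix
-- ===== Notes on version B (the rewrite author's own statement) =====
-- stated objective: alternative
-- what changed: Replaces the non-tail recursion on inner generic types by an explicit loop that peels List/ResponseEntity wrappers while maintaining a suffix accumulator (one array-brackets pair per List layer), returning the mapped name, Dto base name or fallback plus the accumulated suffix in one pass.
import Mathlib
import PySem

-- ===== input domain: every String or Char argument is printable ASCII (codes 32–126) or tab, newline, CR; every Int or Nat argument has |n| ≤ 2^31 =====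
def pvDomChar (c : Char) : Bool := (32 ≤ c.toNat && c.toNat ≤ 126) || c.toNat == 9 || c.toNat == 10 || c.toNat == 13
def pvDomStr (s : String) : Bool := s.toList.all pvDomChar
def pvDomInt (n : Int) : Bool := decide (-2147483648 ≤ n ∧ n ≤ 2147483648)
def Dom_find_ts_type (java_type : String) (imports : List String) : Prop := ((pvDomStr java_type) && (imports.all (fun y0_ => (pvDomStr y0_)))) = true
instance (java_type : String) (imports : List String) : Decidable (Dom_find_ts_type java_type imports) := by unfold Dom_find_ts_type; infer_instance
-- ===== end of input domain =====

-- B rewrites A's recursion on inner generic types as an explicit loop with a suffix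
-- accumulator (objective: alternative decomposition). Both Pythons append the same
-- import line to the mutable `imports` argument; the equivalence proved here is about
-- the RETURN value only (the Lean ports cannot mutate their argument).

-- ===== PORT A =====
-- the module-level dict `type_mapping` (duplicate 'double' key kept; Dict.ofList overwrites in place like Python)
def tsMapping : PySem.Dict (List Char) (List Char) :=
  PySem.Dict.ofList
    [("String".toList, "string".toList), ("int".toList, "number".toList),
     ("Integer".toList, "number".toList), ("long".toList, "number".toList),
     ("Long".toList, "number".toList), ("float".toList, "number".toList),
     ("double".toList, "number".toList), ("Double".toList, "number".toList),
     ("Float".toList, "number".toList), ("double".toList, "number".toList),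
     ("boolean".toList, "boolean".toList), ("Boolean".toList, "boolean".toList),
     ("LocalDateTime".toList, "Date".toList), ("LocalDate".toList, "Date".toList),
     ("LocalTime".toList, "Date".toList), ("MultipartFile".toList, "File".toList),
     ("HttpStatus".toList, "HttpStatusCode".toList)]

-- A's recursion, step for step, on code points; the fuel (= length+1, shrinking inner
-- types keep it positive) only makes the recursion structural and never runs out.
def findTsA : Nat → List Char → List Char
  | 0, _ => []
  | fuel+1, cs =>
    let s := PySem.Chars.strip cs                                  -- java_type = java_type.strip()
    if tsMapping.contains s then tsMapping.getD s "any".toList     -- in keys → .get(., 'any')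
    else if PySem.Chars.endswith s "Dto".toList then
      PySem.List.slice s none (some (-3))                          -- java_type[:-3] (imports.append is a side effect, not part of the value)
    else if PySem.Chars.isIn ['<'] s then
      let next := PySem.Chars.strip ((PySem.Chars.splitOn s ['<']).headD [])  -- split('<')[0].strip(); split is never empty, headD is its [0]
      if next == "Map".toList then "Object".toList
      else if next == "List".toList then
        findTsA fuel (PySem.Chars.strip
          (PySem.List.slice s (some (PySem.Chars.find s ['<'] + 1)) (some (-1)))) ++ "[]".toList
      else if next == "ResponseEntity".toList then
        findTsA fuel (PySem.Chars.strip
          (PySem.List.slice s (some (PySem.Chars.find s ['<'] + 1)) (some (-1))))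
      else "any".toList
    else "any".toList

def find_ts_type (java_type : String) (imports : List String) : String :=
  String.ofList (findTsA (java_type.toList.length + 1) java_type.toList)

-- ===== PORT B =====
-- Source B's while-loop with the suffix accumulator, as tail recursion on the same fuel.
def findTsB : Nat → List Char → List Char → List Char
  | 0, _, suffix => suffix
  | fuel+1, t0, suffix =>
    let t := PySem.Chars.strip t0                                  -- t = t.strip()
    match tsMapping.get? t with                                    -- mapped = type_mapping.get(t)
    | some v => v ++ suffix
    | none =>
      if PySem.Chars.endswith t "Dto".toList then
        PySem.List.slice t none (some (-3)) ++ suffix              -- base + suffix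
      else
        let lt := PySem.Chars.find t ['<']                         -- lt = t.find('<')
        if lt == -1 then "any".toList ++ suffix
        else
          let head := PySem.Chars.strip (PySem.List.slice t none (some lt))  -- t[:lt].strip()
          if head == "Map".toList then "Object".toList ++ suffix
          else if head == "List".toList || head == "ResponseEntity".toList then
            findTsB fuel (PySem.List.slice t (some (lt + 1)) (some (-1)))
              (if head == "List".toList then "[]".toList ++ suffix else suffix)
          else "any".toList ++ suffix

def find_ts_type_alt (java_type : String) (imports : List String) : String :=
  String.ofList (findTsB (java_type.toList.length + 1) java_type.toList [])

-- ===== PRECONDITION & SPEC =====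
def Spec_find_ts_type (java_type : String) (imports : List String) (out : String) : Prop := out = find_ts_type_alt java_type imports
instance (java_type : String) (imports : List String) (out : String) : Decidable (Spec_find_ts_type java_type imports out) := by unfold Spec_find_ts_type; infer_instance

-- ===== CLAIM (what is proved, stated in full; the proofs are below) =====
def Claim_equal_find_ts_type : Prop := ∀ (java_type : String) (imports : List String), Dom_find_ts_type java_type imports → Spec_find_ts_type java_type imports (find_ts_type java_type imports)

-- ===== LEMMAS AND PROOFS =====

-- strip is idempotent (A's recursion strips an argument B passes unstripped)
theorem strip_idem (s : List Char) :
    PySem.Chars.strip (PySem.Chars.strip s) = PySem.Chars.strip s := by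
  unfold PySem.Chars.strip PySem.Chars.rstrip PySem.Chars.lstrip
  generalize PySem.Chars.isspace = p
  have hvp : (List.dropWhile p (List.dropWhile p s).reverse).reverse <+: List.dropWhile p s := by
    have : List.dropWhile p (List.dropWhile p s).reverse <:+ (List.dropWhile p s).reverse :=
      List.dropWhile_suffix p
    simpa using this.reverse
  have hlv : List.dropWhile p (List.dropWhile p (List.dropWhile p s).reverse).reverse
      = (List.dropWhile p (List.dropWhile p s).reverse).reverse := by
    cases hvd : (List.dropWhile p (List.dropWhile p s).reverse).reverse with
    | nil => simp
    | cons a t =>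
      rw [hvd] at hvp
      rcases hvp with ⟨w, hw⟩
      have hne : List.dropWhile p s ≠ [] := by rw [← hw]; simp
      have hpa : p a = false := by
        have h2 := List.head_dropWhile_not p hne
        have : (List.dropWhile p s).head hne = a := by
          apply Option.some_injective
          rw [← List.head?_eq_some_head, ← hw]; simp
        rwa [this] at h2
      simp [hpa]
  rw [hlv, List.reverse_reverse, List.dropWhile_idempotent]

-- A's port is insensitive to pre-stripping its argument
theorem findTsA_strip (fuel : Nat) (s : List Char) :
    findTsA fuel (PySem.Chars.strip s) = findTsA fuel s := by
  cases fuel with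
  | zero => rfl
  | succ n => simp only [findTsA, strip_idem]

-- find.go on a singleton needle that occurs: index = start + length of the '!= c' prefix
theorem find_go_singleton (c : Char) (s : List Char) (k : Nat) (h : c ∈ s) :
    PySem.Chars.find.go [c] s k = (k : Int) + ((s.takeWhile (· != c)).length : Int) := by
  induction s generalizing k with
  | nil => simp at h
  | cons a t ih =>
    by_cases hac : a = c
    · subst hac
      simp [PySem.Chars.find.go, List.isPrefixOf, List.takeWhile]
    · have hmem : c ∈ t := by
        rcases List.mem_cons.mp h with h1 | h1
        · exact absurd h1.symm hac
        · exact h1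
      have hpre : List.isPrefixOf [c] (a :: t) = false := by
        simp [List.isPrefixOf]; exact fun e => absurd e.symm hac
      rw [show PySem.Chars.find.go [c] (a :: t) k
            = PySem.Chars.find.go [c] t (k + 1) by simp [PySem.Chars.find.go, hpre]]
      rw [ih (k+1) hmem]
      have : (a :: t).takeWhile (· != c) = a :: t.takeWhile (· != c) := by
        have : (a != c) = true := by simp [hac]
        simp [List.takeWhile, this]
      rw [this]
      simp
      omega

-- splitOn.go only prepends the accumulator (reversed)
theorem splitOn_go_acc (sep : List Char) (fuel : Nat) (l cur : List Char)
    (acc : List (List Char)) :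
    PySem.Chars.splitOn.go sep fuel l cur acc
      = acc.reverse ++ PySem.Chars.splitOn.go sep fuel l cur [] := by
  induction fuel generalizing l cur acc with
  | zero => simp [PySem.Chars.splitOn.go]
  | succ n ih =>
    cases l with
    | nil => simp [PySem.Chars.splitOn.go]
    | cons a t =>
      by_cases hp : sep.isPrefixOf (a :: t) = true
      · rw [show PySem.Chars.splitOn.go sep (n+1) (a :: t) cur acc
              = PySem.Chars.splitOn.go sep n (List.drop sep.length (a :: t)) [] (cur.reverse :: acc) by
            simp [PySem.Chars.splitOn.go, hp]]
        rw [show PySem.Chars.splitOn.go sep (n+1) (a :: t) cur []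
              = PySem.Chars.splitOn.go sep n (List.drop sep.length (a :: t)) [] [cur.reverse] by
            simp [PySem.Chars.splitOn.go, hp]]
        rw [ih _ _ (cur.reverse :: acc), ih _ _ [cur.reverse]]
        simp
      · rw [show PySem.Chars.splitOn.go sep (n+1) (a :: t) cur acc
              = PySem.Chars.splitOn.go sep n t (a :: cur) acc by
            simp [PySem.Chars.splitOn.go, hp]]
        rw [show PySem.Chars.splitOn.go sep (n+1) (a :: t) cur []
              = PySem.Chars.splitOn.go sep n t (a :: cur) [] by
            simp [PySem.Chars.splitOn.go, hp]]
        exact ih _ _ acc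

-- head of splitOn.go on a singleton separator that occurs
theorem splitOn_go_head (c : Char) (fuel : Nat) (l cur : List Char)
    (h : c ∈ l) (hf : l.length < fuel) :
    (PySem.Chars.splitOn.go [c] fuel l cur []).headD []
      = cur.reverse ++ l.takeWhile (· != c) := by
  induction fuel generalizing l cur with
  | zero => omega
  | succ n ih =>
    cases l with
    | nil => simp at h
    | cons a t =>
      by_cases hac : a = c
      · subst hac
        have hp : List.isPrefixOf [a] (a :: t) = true := by simp [List.isPrefixOf]
        rw [show PySem.Chars.splitOn.go [a] (n+1) (a :: t) cur []
              = PySem.Chars.splitOn.go [a] n (List.drop 1 (a :: t)) [] [cur.reverse] by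
            simp [PySem.Chars.splitOn.go, hp]]
        rw [splitOn_go_acc]
        simp
      · have hmem : c ∈ t := by
          rcases List.mem_cons.mp h with h1 | h1
          · exact absurd h1.symm hac
          · exact h1
        have hp : List.isPrefixOf [c] (a :: t) = false := by
          simp [List.isPrefixOf]; exact fun e => absurd e.symm hac
        rw [show PySem.Chars.splitOn.go [c] (n+1) (a :: t) cur []
              = PySem.Chars.splitOn.go [c] n t (a :: cur) [] by
            simp [PySem.Chars.splitOn.go, hp]]
        rw [ih t (a :: cur) hmem (by simpa using Nat.lt_of_succ_lt_succ hf)]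
        have hne : (a != c) = true := by simp [hac]
        have : (a :: t).takeWhile (· != c) = a :: t.takeWhile (· != c) := by
          simp [List.takeWhile, hne]
        rw [this]
        simp

-- s.split(c)[0] = s[:s.find(c)] when c occurs in s
theorem split_head_eq_take_find (c : Char) (s : List Char) (h : c ∈ s) :
    (PySem.Chars.splitOn s [c]).headD []
      = PySem.List.slice s none (some (PySem.Chars.find s [c])) := by
  rw [show PySem.Chars.splitOn s [c] = PySem.Chars.splitOn.go [c] (s.length + 1) s [] [] from rfl]
  rw [splitOn_go_head c (s.length + 1) s [] h (by omega)]
  rw [show PySem.Chars.find s [c] = PySem.Chars.find.go [c] s 0 from rfl]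
  rw [find_go_singleton c s 0 h]
  rw [show ((0:Nat) : Int) + ((s.takeWhile (· != c)).length : Int)
        = (((s.takeWhile (· != c)).length : Nat) : Int) by push_cast; ring]
  rw [PySem.List.slice_to_natCast]
  simpa using List.prefix_iff_eq_take.mp (List.takeWhile_prefix _)

-- B's loop computes A's result followed by the suffix accumulator
theorem findTsB_eq_findTsA (fuel : Nat) (t suffix : List Char) :
    findTsB fuel t suffix = findTsA fuel t ++ suffix := by
  induction fuel generalizing t suffix with
  | zero => simp [findTsA, findTsB]
  | succ n ih =>
    simp only [findTsA, findTsB]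
    cases hg : tsMapping.get? (PySem.Chars.strip t) with
    | some v =>
      have hc : tsMapping.contains (PySem.Chars.strip t) = true := by
        rw [PySem.Dict.contains_eq_isSome_get?, hg]; rfl
      simp only [hc, if_true]
      rw [PySem.Dict.getD_eq_get?_getD, hg]
      rfl
    | none =>
      have hc : tsMapping.contains (PySem.Chars.strip t) = false := by
        rw [PySem.Dict.contains_eq_isSome_get?, hg]; rfl
      simp only [hc, Bool.false_eq_true, if_false]
      by_cases hin : PySem.Chars.isIn ['<'] (PySem.Chars.strip t) = true
      · have hne : PySem.Chars.find (PySem.Chars.strip t) ['<'] ≠ -1 := by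
          simpa [PySem.Chars.isIn] using hin
        have hmem : '<' ∈ PySem.Chars.strip t := by
          have := (PySem.Chars.isIn_iff_infix (sub := ['<']) (s := PySem.Chars.strip t)).mp hin
          exact (List.singleton_infix_iff '<' _).mp this
        rw [split_head_eq_take_find '<' _ hmem]
        simp only [hin, if_true, hne, if_false, beq_iff_eq, Bool.or_eq_true]
        split_ifs <;>
          first
            | rfl
            | (rw [ih, findTsA_strip]; try simp)
            | tauto
            | simp
      · simp only [Bool.not_eq_true] at hin
        have heq : PySem.Chars.find (PySem.Chars.strip t) ['<'] = -1 := by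
          have := hin
          simp only [PySem.Chars.isIn] at this
          simpa using this
        simp only [heq, beq_self_eq_true, if_true, hin, Bool.false_eq_true, if_false]
        split_ifs <;> simp

-- ===== VERDICT (by name: the statement is the Claim_ definition above) =====
theorem find_ts_type_spec : Claim_equal_find_ts_type := by
  intro java_type imports _
  unfold Spec_find_ts_type find_ts_type find_ts_type_alt
  rw [findTsB_eq_findTsA, List.append_nil]
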